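-- pv_equiv track=rewrite | github.com/alejandrodelcs/GuiaEjercicios | parcialpractica/delcarpio_99655_ej3.py | partidos_jugados
-- ===== SOURCE A (Python) =====
-- def partidos_jugados(campeonato):
--     acum = 0
--     lista_partidos_jugados=[]
--     for equipo,jugadas in campeonato.items():
--         acum = jugadas[0]+jugadas[1]+jugadas[2]
--         lista_partidos_jugados.append(acum)
--
--     max_cant_jugadas = max(lista_partidos_jugados)
--
--     mas_partidos_jugados =  lista_partidos_jugados.count(max_cant_jugadas)
--
--     return mas_partidos_jugados == 1
-- ===== SOURCE B (Python) =====
-- def partidos_jugados(campeonato):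
--     best = None
--     count = 0
--     for equipo, jugadas in campeonato.items():
--         s = jugadas[0] + jugadas[1] + jugadas[2]
--         if best is None or s > best:
--             best = s
--             count = 1
--         elif s == best:
--             count += 1
--     return count == 1
-- ===== Notes on version B (the rewrite author's own statement) =====
-- stated objective: simpler
-- what changed: Single pass keeping a running best total and a count of teams tying it, instead of building a totals list and then scanning it twice with max() and count().
-- outside the precondition, e.g. on partidos_jugados({}): A raises ValueError, B returns False
import Mathlib
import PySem

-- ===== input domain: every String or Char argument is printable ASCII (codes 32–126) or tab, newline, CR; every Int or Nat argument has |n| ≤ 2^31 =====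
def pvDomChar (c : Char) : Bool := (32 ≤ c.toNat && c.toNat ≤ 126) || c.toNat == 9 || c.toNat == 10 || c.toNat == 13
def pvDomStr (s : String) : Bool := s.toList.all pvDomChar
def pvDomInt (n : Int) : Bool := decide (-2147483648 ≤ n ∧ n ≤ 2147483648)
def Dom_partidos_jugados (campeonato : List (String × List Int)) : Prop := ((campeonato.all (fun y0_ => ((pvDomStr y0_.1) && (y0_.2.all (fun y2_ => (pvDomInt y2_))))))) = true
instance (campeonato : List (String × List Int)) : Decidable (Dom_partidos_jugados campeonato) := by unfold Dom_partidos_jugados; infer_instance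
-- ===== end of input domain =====

-- B replaces A's list-build + max() + count() three-pass scheme by one pass with a running best/count (objective: simpler).

-- ===== PORT A =====
-- acum = jugadas[0]+jugadas[1]+jugadas[2]; out of range would be IndexError (excluded by Pre_), so getD's default is never read there
def pvTotal (jugadas : List Int) : Int :=
  (PySem.List.pyGet? jugadas 0).getD 0 + (PySem.List.pyGet? jugadas 1).getD 0 + (PySem.List.pyGet? jugadas 2).getD 0

def partidos_jugados (campeonato : List (String × List Int)) : Bool :=
  let lista := campeonato.foldl (fun acc p => acc ++ [pvTotal p.2]) []
  -- max(lista): ValueError on empty list, excluded by Pre_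
  let max_cant := (PySem.List.max? lista (fun y => y)).getD 0
  decide ((lista.count max_cant : Int) = 1)

-- ===== PORT B =====
def pvStepB (st : Option Int × Int) (p : String × List Int) : Option Int × Int :=
  let s := pvTotal p.2
  match st.1 with
  | none => (some s, 1)
  | some b => if s > b then (some s, 1) else if s = b then (some b, st.2 + 1) else st

def partidos_jugados_alt (campeonato : List (String × List Int)) : Bool :=
  decide ((campeonato.foldl pvStepB (none, 0)).2 = 1)

-- ===== PRECONDITION & SPEC =====
-- Pre_ excludes exactly where A raises: the empty dict (max([]) → ValueError) and any team whose
-- jugadas list has fewer than 3 entries (jugadas[2] → IndexError).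
def Pre_partidos_jugados (campeonato : List (String × List Int)) : Prop :=
  campeonato ≠ [] ∧ ∀ p ∈ campeonato, 3 ≤ p.2.length
instance (campeonato : List (String × List Int)) : Decidable (Pre_partidos_jugados campeonato) := by
  unfold Pre_partidos_jugados; infer_instance

def pvWitness_partidos_jugados : (List (String × List Int)) := [("a", [1, 2, 3]), ("b", [0, 0, 1])]

def Spec_partidos_jugados (campeonato : List (String × List Int)) (out : Bool) : Prop := out = partidos_jugados_alt campeonato
instance (campeonato : List (String × List Int)) (out : Bool) : Decidable (Spec_partidos_jugados campeonato out) := by unfold Spec_partidos_jugados; infer_instance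

-- ===== CLAIM (what is proved, stated in full; the proofs are below) =====
def Claim_equal_partidos_jugados : Prop := ∀ (campeonato : List (String × List Int)), Dom_partidos_jugados campeonato → Pre_partidos_jugados campeonato → Spec_partidos_jugados campeonato (partidos_jugados campeonato)

-- ===== LEMMAS AND PROOFS =====

-- B's fold, started after the first team, computes the running max and the count of teams attaining it.
theorem pvStepB_invariant (l : List (String × List Int)) (b : Int) (c : Int) :
    l.foldl pvStepB (some b, c)
      = (some ((l.map (fun p => pvTotal p.2)).foldl max b),
         ((l.map (fun p => pvTotal p.2)).count ((l.map (fun p => pvTotal p.2)).foldl max b) : Int)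
           + (if (l.map (fun p => pvTotal p.2)).foldl max b = b then c else 0)) := by
  induction l generalizing b c with
  | nil => simp
  | cons p l ih =>
    simp only [List.foldl_cons, List.map_cons]
    rcases lt_trichotomy (pvTotal p.2) b with hlt | heq | hgt
    · have hstep : pvStepB (some b, c) p = (some b, c) := by
        simp [pvStepB, not_lt.mpr (le_of_lt hlt), ne_of_lt hlt]
      simp only [hstep, ih]
      have hmax : max b (pvTotal p.2) = b := max_eq_left (le_of_lt hlt)
      have hle : b ≤ (l.map (fun p => pvTotal p.2)).foldl max b :=
        (PySem.List.le_foldl_max _ _).1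
      have hne : ¬ (pvTotal p.2 = (l.map (fun p => pvTotal p.2)).foldl max b) := by
        intro h; omega
      simp [hmax, hne]
    · have hstep : pvStepB (some b, c) p = (some b, c + 1) := by
        simp [pvStepB, heq]
      simp only [hstep, ih]
      have hmax : max b (pvTotal p.2) = b := by simp [heq]
      simp only [hmax]
      by_cases hMb : (l.map (fun p => pvTotal p.2)).foldl max b = b
      · simp [heq, hMb]; ring
      · have hne : ¬ (pvTotal p.2 = (l.map (fun p => pvTotal p.2)).foldl max b) := by
          rw [heq]; exact fun h => hMb h.symm
        simp [hne, hMb]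
    · have hstep : pvStepB (some b, c) p = (some (pvTotal p.2), 1) := by
        simp [pvStepB, hgt]
      simp only [hstep, ih]
      have hmax : max b (pvTotal p.2) = pvTotal p.2 := max_eq_right (le_of_lt hgt)
      simp only [hmax]
      have hle : pvTotal p.2 ≤ (l.map (fun p => pvTotal p.2)).foldl max (pvTotal p.2) :=
        (PySem.List.le_foldl_max _ _).1
      by_cases hM : (l.map (fun p => pvTotal p.2)).foldl max (pvTotal p.2) = pvTotal p.2
      · have hnb : ¬ ((l.map (fun p => pvTotal p.2)).foldl max (pvTotal p.2) = b) := by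
          rw [hM]; omega
        simp [hM]
        omega
      · have hne : ¬ (pvTotal p.2 = (l.map (fun p => pvTotal p.2)).foldl max (pvTotal p.2)) := by
          intro h; exact hM h.symm
        have hnb : ¬ ((l.map (fun p => pvTotal p.2)).foldl max (pvTotal p.2) = b) := by
          intro h; omega
        simp [hne, hM]
        omega

-- ===== VERDICT (by name: the statement is the Claim_ definition above) =====
theorem partidos_jugados_spec : Claim_equal_partidos_jugados := by
  intro campeonato _ hpre
  obtain ⟨hne, -⟩ := hpre
  unfold Spec_partidos_jugados partidos_jugados partidos_jugados_alt
  obtain ⟨p, l, rfl⟩ := List.exists_cons_of_ne_nil hne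
  rw [PySem.List.foldl_append_singleton_eq_map]
  simp only [List.map_cons, List.foldl_cons]
  have hstep : pvStepB (none, 0) p = (some (pvTotal p.2), 1) := by simp [pvStepB]
  simp only [List.nil_append, PySem.List.max?_id_cons, Option.getD_some, hstep,
    pvStepB_invariant, List.count_cons, decide_eq_decide]
  by_cases hM : (l.map (fun p => pvTotal p.2)).foldl max (pvTotal p.2) = pvTotal p.2
  · simp [hM]
  · have hne' : ¬ (pvTotal p.2 = (l.map (fun p => pvTotal p.2)).foldl max (pvTotal p.2)) :=
      fun h => hM h.symm
    simp [hne', hM]
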